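-- pv_equiv track=rewrite | github.com/Arnaud-TP/MyGit | MPSI - MP/Info Prépa/TD 9 Tris/TD 9 Algo de tri.py | bouge
-- ===== SOURCE A (Python) =====
-- def bouge(L,dep,arr):
--     Cout = 0
--     if dep < arr :
--         for i in range (arr-dep):
--             L[dep+i],L[dep+i+1]=L[dep+i+1],L[dep+i]
--             Cout+=1
--         Cout+=1
--         return(Cout)
--     else :
--         for i in range (dep-arr):
--             L[dep-i],L[dep-i-1]=L[dep-i-1],L[dep-i]
--             Cout+=1
--         Cout+=1
--         return(Cout)
-- ===== SOURCE B (Python) =====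
-- def bouge(L, dep, arr):
--     # Moves L[dep] to position arr in one pop+insert instead of a swap loop;
--     # returns the same count abs(dep-arr)+1. (In-place mutation of L can differ
--     # from A's for negative/clamped insert positions; the equivalence claimed is
--     # about the return value.)
--     val = L.pop(dep)
--     L.insert(arr, val)
--     return abs(dep - arr) + 1
-- ===== Notes on version B (the rewrite author's own statement) =====
-- stated objective: simpler
-- what changed: B replaces A's two adjacent-swap loops (one per direction) by a single pop(dep)/insert(arr) pair and returns the closed form abs(dep-arr)+1 instead of counting loop iterations.
-- outside the precondition, e.g. on bouge([], 0, 0): A returns 1, B raises IndexError; on bouge([1, 2], 5, 5): A returns 1, B raises IndexError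
import Mathlib
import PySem

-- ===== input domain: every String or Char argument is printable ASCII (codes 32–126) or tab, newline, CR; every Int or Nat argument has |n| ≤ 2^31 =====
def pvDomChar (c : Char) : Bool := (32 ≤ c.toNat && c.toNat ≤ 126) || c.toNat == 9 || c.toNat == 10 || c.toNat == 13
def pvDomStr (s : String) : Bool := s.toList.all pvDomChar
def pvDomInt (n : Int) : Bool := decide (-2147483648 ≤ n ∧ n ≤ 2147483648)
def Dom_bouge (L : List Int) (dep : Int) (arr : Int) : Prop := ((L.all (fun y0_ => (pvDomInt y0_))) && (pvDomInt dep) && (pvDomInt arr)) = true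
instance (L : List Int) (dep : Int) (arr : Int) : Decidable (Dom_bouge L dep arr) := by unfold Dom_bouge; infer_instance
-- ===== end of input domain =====

-- B replaces A's adjacent-swap loops by one pop/insert and the closed form |dep-arr|+1 (simpler).
-- A and B both mutate the Python list L in place; the equivalence proved here is about the RETURN value only
-- (for negative or clamped positions the two in-place states can differ).

-- ===== PORT A =====
-- Python 'L[i],L[j] = L[j],L[i]': evaluate L[j], L[i], then assign L[i], L[j] (none = IndexError).
def pvSwap (L : List Int) (i j : Int) : Option (List Int) :=
  match PySem.List.pyGet? L j, PySem.List.pyGet? L i with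
  | some a, some b =>
    match PySem.List.pySet? L i a with
    | some L1 => PySem.List.pySet? L1 j b
    | none => none
  | _, _ => none

-- 'for i in range(arr-dep): swap L[dep+i], L[dep+i+1]; Cout += 1' (k = remaining iterations)
def bougeLoopUp (dep : Int) : Nat → Nat → List Int → Int → Option (List Int × Int)
  | 0, _, L, c => some (L, c)
  | k + 1, i, L, c =>
    match pvSwap L (dep + (i : Int)) (dep + (i : Int) + 1) with
    | some L' => bougeLoopUp dep k (i + 1) L' (c + 1)
    | none => none

-- 'for i in range(dep-arr): swap L[dep-i], L[dep-i-1]; Cout += 1'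
def bougeLoopDown (dep : Int) : Nat → Nat → List Int → Int → Option (List Int × Int)
  | 0, _, L, c => some (L, c)
  | k + 1, i, L, c =>
    match pvSwap L (dep - (i : Int)) (dep - (i : Int) - 1) with
    | some L' => bougeLoopDown dep k (i + 1) L' (c + 1)
    | none => none

def bouge (L : List Int) (dep : Int) (arr : Int) : Int :=
  if dep < arr then
    match bougeLoopUp dep (arr - dep).toNat 0 L 0 with
    | some (_, c) => c + 1
    | none => 0          -- IndexError in Python: excluded by Pre_bouge
  else
    match bougeLoopDown dep (dep - arr).toNat 0 L 0 with
    | some (_, c) => c + 1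
    | none => 0          -- IndexError in Python: excluded by Pre_bouge

-- ===== PORT B =====
def bouge_alt (L : List Int) (dep : Int) (arr : Int) : Int :=
  match PySem.List.pop? L dep with
  | none => 0            -- IndexError in Python: excluded by Pre_bouge
  | some (val, rest) =>
    let _ := PySem.List.insert rest arr val   -- the in-place mutation of L; unused by the return value
    |dep - arr| + 1

-- ===== PRECONDITION & SPEC =====
-- Pre_ excludes out-of-range indices: there A raises an IndexError, except when dep == arr is out of
-- range, where A's empty loop accidentally returns 1 without touching L while B's pop raises.
def Pre_bouge (L : List Int) (dep : Int) (arr : Int) : Prop :=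
  PySem.Raise.InRange L.length dep ∧ PySem.Raise.InRange L.length arr
instance (L : List Int) (dep : Int) (arr : Int) : Decidable (Pre_bouge L dep arr) := by
  unfold Pre_bouge; infer_instance
def pvWitness_bouge : List Int × Int × Int := ([3, 1, 4, 1, 5], 4, 1)
def Spec_bouge (L : List Int) (dep : Int) (arr : Int) (out : Int) : Prop := out = bouge_alt L dep arr
instance (L : List Int) (dep : Int) (arr : Int) (out : Int) : Decidable (Spec_bouge L dep arr out) := by unfold Spec_bouge; infer_instance

-- ===== CLAIM (what is proved, stated in full; the proofs are below) =====
def Claim_equal_bouge : Prop := ∀ (L : List Int) (dep : Int) (arr : Int), Dom_bouge L dep arr → Pre_bouge L dep arr → Spec_bouge L dep arr (bouge L dep arr)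

-- ===== LEMMAS AND PROOFS =====

theorem pvSwap_some (L : List Int) (i j : Int)
    (hi : PySem.Raise.InRange L.length i) (hj : PySem.Raise.InRange L.length j) :
    ∃ L', pvSwap L i j = some L' ∧ L'.length = L.length := by
  obtain ⟨a, ha⟩ : ∃ a, PySem.List.pyGet? L j = some a := by
    cases h : PySem.List.pyGet? L j with
    | none => exact absurd ((PySem.List.pyGet?_eq_none_iff L j).mp h) (not_not_intro hj)
    | some a => exact ⟨a, rfl⟩
  obtain ⟨b, hb⟩ : ∃ b, PySem.List.pyGet? L i = some b := by
    cases h : PySem.List.pyGet? L i with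
    | none => exact absurd ((PySem.List.pyGet?_eq_none_iff L i).mp h) (not_not_intro hi)
    | some b => exact ⟨b, rfl⟩
  obtain ⟨L1, h1⟩ : ∃ L1, PySem.List.pySet? L i a = some L1 := by
    cases h : PySem.List.pySet? L i a with
    | none => exact absurd ((PySem.List.pySet?_eq_none_iff L i a).mp h) (not_not_intro hi)
    | some L1 => exact ⟨L1, rfl⟩
  have hL1 : L1.length = L.length := by
    have := PySem.List.length_pySetD L i a
    simp only [PySem.List.pySetD, h1, Option.getD_some] at this
    exact this
  obtain ⟨L2, h2⟩ : ∃ L2, PySem.List.pySet? L1 j b = some L2 := by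
    cases h : PySem.List.pySet? L1 j b with
    | none =>
      rw [PySem.List.pySet?_eq_none_iff, hL1] at h
      exact absurd h (not_not_intro hj)
    | some L2 => exact ⟨L2, rfl⟩
  have hL2 : L2.length = L1.length := by
    have := PySem.List.length_pySetD L1 j b
    simp only [PySem.List.pySetD, h2, Option.getD_some] at this
    exact this
  exact ⟨L2, by simp [pvSwap, ha, hb, h1, h2], by omega⟩

theorem bougeLoopUp_some (dep : Int) :
    ∀ (k i : Nat) (L : List Int) (c : Int),
      (∀ m : Nat, m ≤ k → PySem.Raise.InRange L.length (dep + (i : Int) + (m : Int))) →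
      ∃ L', bougeLoopUp dep k i L c = some (L', c + (k : Int)) := by
  intro k
  induction k with
  | zero => intro i L c _; exact ⟨L, by simp [bougeLoopUp]⟩
  | succ k ih =>
    intro i L c h
    obtain ⟨L', hs, hlen⟩ := pvSwap_some L (dep + (i : Int)) (dep + (i : Int) + 1)
      (by have := h 0 (by omega); simpa using this)
      (by have := h 1 (by omega); unfold PySem.Raise.InRange at this ⊢; push_cast at this ⊢; omega)
    obtain ⟨L'', h2⟩ := ih (i + 1) L' (c + 1) (by
      intro m hm
      have := h (m + 1) (by omega)
      rw [hlen]
      unfold PySem.Raise.InRange at this ⊢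
      push_cast at this ⊢
      omega)
    refine ⟨L'', ?_⟩
    simp only [bougeLoopUp, hs, h2]
    congr 1
    push_cast
    ring_nf

theorem bougeLoopDown_some (dep : Int) :
    ∀ (k i : Nat) (L : List Int) (c : Int),
      (∀ m : Nat, m ≤ k → PySem.Raise.InRange L.length (dep - (i : Int) - (m : Int))) →
      ∃ L', bougeLoopDown dep k i L c = some (L', c + (k : Int)) := by
  intro k
  induction k with
  | zero => intro i L c _; exact ⟨L, by simp [bougeLoopDown]⟩
  | succ k ih =>
    intro i L c h
    obtain ⟨L', hs, hlen⟩ := pvSwap_some L (dep - (i : Int)) (dep - (i : Int) - 1)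
      (by have := h 0 (by omega); simpa using this)
      (by have := h 1 (by omega); unfold PySem.Raise.InRange at this ⊢; push_cast at this ⊢; omega)
    obtain ⟨L'', h2⟩ := ih (i + 1) L' (c + 1) (by
      intro m hm
      have := h (m + 1) (by omega)
      rw [hlen]
      unfold PySem.Raise.InRange at this ⊢
      push_cast at this ⊢
      omega)
    refine ⟨L'', ?_⟩
    simp only [bougeLoopDown, hs, h2]
    congr 1
    push_cast
    ring_nf

theorem pop?_some_of_inRange (L : List Int) (i : Int)
    (hi : PySem.Raise.InRange L.length i) : ∃ r, PySem.List.pop? L i = some r := by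
  obtain ⟨hlo, hhi⟩ := hi
  unfold PySem.List.pop? PySem.List.pyIdx?
  by_cases h0 : 0 ≤ i
  · have hk : i.toNat < L.length := by omega
    refine ⟨(L[i.toNat], L.eraseIdx i.toNat), ?_⟩
    simp [h0, hhi, hk]
  · have hn : 1 ≤ (-i).toNat ∧ (-i).toNat ≤ L.length := by omega
    have hk : L.length - (-i).toNat < L.length := by omega
    refine ⟨(L[L.length - (-i).toNat], L.eraseIdx (L.length - (-i).toNat)), ?_⟩
    simp [h0, hlo, hk]

-- ===== VERDICT (by name: the statement is the Claim_ definition above) =====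
theorem bouge_spec : Claim_equal_bouge := by
  intro L dep arr _ hpre
  obtain ⟨hdep, harr⟩ := hpre
  unfold Spec_bouge bouge bouge_alt
  obtain ⟨⟨val, rest⟩, hpop⟩ := pop?_some_of_inRange L dep hdep
  rw [hpop]
  by_cases hlt : dep < arr
  · obtain ⟨L', hloop⟩ := bougeLoopUp_some dep (arr - dep).toNat 0 L 0 (by
      intro m hm
      unfold PySem.Raise.InRange at *
      push_cast
      omega)
    simp only [hlt, if_true, hloop]
    have : |dep - arr| = arr - dep := by rw [abs_sub_comm]; exact abs_of_nonneg (by omega)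
    rw [this]
    omega
  · obtain ⟨L', hloop⟩ := bougeLoopDown_some dep (dep - arr).toNat 0 L 0 (by
      intro m hm
      unfold PySem.Raise.InRange at *
      push_cast
      omega)
    simp only [hlt, if_false, hloop]
    have : |dep - arr| = dep - arr := abs_of_nonneg (by omega)
    rw [this]
    omega
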